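-- pv_equiv track=rewrite | github.com/Serkan0YLDZ/Optical_Form_Reader | code.py | analyze_groups
-- ===== SOURCE A (Python) =====
-- from typing import List, Tuple, Dict
-- import string
--
-- def analyze_groups(groups: List[List[Dict]], answer_key: List[str]) -> Dict[str, int]:
--     results = {
--         'correct': 0,
--         'incorrect': 0,
--         'empty': 0,
--         'invalid': 0
--     }
--     answer_status = []
--
--     for i, group in enumerate(groups):
--         if i >= len(answer_key):
--             break
--
--         marked_circles = sum(1 for circle in group if circle['is_filled'])
--
--         if marked_circles == 0:
--             results['empty'] += 1
--             answer_status.append((i + 1, 'Empty', None, answer_key[i]))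
--         elif marked_circles > 1:
--             results['invalid'] += 1
--             answer_status.append((i + 1, 'Invalid', None, answer_key[i]))
--         else:
--             marked_index = next(i for i, circle in enumerate(group) if circle['is_filled'])
--             marked_answer = string.ascii_lowercase[marked_index]
--             correct_answer = answer_key[i]
--
--             if marked_answer == correct_answer:
--                 results['correct'] += 1
--                 answer_status.append((i + 1, 'Correct', marked_answer, correct_answer))
--             else:
--                 results['incorrect'] += 1
--                 answer_status.append((i + 1, 'Incorrect', marked_answer, correct_answer))
--
--     return results, answer_status
-- ===== SOURCE B (Python) =====
-- import string
--
-- def _scan(circles):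
--     # Fold a 3-state automaton over the circles: 'empty', ('mark', j) or 'invalid'.
--     state = 'empty'
--     for j, c in enumerate(circles):
--         if c['is_filled']:
--             state = ('mark', j) if state == 'empty' else 'invalid'
--     return state
--
-- def _rows(groups, keys, n):
--     if not groups or not keys:
--         return []
--     state = _scan(groups[0])
--     key = keys[0]
--     if state == 'empty':
--         row = (n, 'Empty', None, key)
--     elif state == 'invalid':
--         row = (n, 'Invalid', None, key)
--     else:
--         marked = string.ascii_lowercase[state[1]]
--         row = (n, 'Correct' if marked == key else 'Incorrect', marked, key)
--     return [row] + _rows(groups[1:], keys[1:], n + 1)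
--
-- def analyze_groups(groups, answer_key):
--     answer_status = _rows(groups, answer_key, 1)
--     labels = [s[1] for s in answer_status]
--     results = {'correct': labels.count('Correct'),
--                'incorrect': labels.count('Incorrect'),
--                'empty': labels.count('Empty'),
--                'invalid': labels.count('Invalid')}
--     return results, answer_status
-- ===== Notes on version B (the rewrite author's own statement) =====
-- stated objective: alternative
-- what changed: B classifies each group by folding a 3-state automaton (empty/mark j/invalid) over its circles in one pass instead of A's count-then-next() rescan, builds the status list by recursion on the two lists (no index/break bookkeeping), and derives the four counters from the finished status list instead of incrementing a mutable dict per iteration.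
import Mathlib
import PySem

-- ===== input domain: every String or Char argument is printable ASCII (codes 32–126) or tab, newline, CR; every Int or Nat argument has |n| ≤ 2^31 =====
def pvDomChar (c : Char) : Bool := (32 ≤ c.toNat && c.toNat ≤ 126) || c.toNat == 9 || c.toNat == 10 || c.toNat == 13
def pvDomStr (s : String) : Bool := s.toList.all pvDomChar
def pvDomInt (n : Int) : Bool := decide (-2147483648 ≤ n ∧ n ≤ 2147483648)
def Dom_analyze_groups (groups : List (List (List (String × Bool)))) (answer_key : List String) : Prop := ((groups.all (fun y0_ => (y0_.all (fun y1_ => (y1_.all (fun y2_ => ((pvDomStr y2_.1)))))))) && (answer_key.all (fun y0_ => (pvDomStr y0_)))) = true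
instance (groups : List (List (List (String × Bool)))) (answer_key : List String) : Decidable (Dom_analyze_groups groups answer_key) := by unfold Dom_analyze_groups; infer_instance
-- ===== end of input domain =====

-- B classifies each group by folding a 3-state automaton over its circles (one pass, no count-then-rescan),
-- builds the status list by structural recursion on the two lists, and derives the counters from the
-- finished status list instead of a mutable dict (objective: alternative).

-- shared reading of circle['is_filled'] (KeyError on a circle without the key is excluded by Pre_)
def pvFilled (c : List (String × Bool)) : Bool := (PySem.Dict.mk c).getD "is_filled" false

def pvLower : String := "abcdefghijklmnopqrstuvwxyz"

-- ===== PORT A =====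
def agA_loop (key : List String) : Nat → List (List (List (String × Bool))) →
    PySem.Dict String Int → List (Int × String × Option String × String) →
    PySem.Dict String Int × List (Int × String × Option String × String)
  | _, [], res, st => (res, st)
  | i, g :: gs, res, st =>
    if key.length ≤ i then (res, st)  -- the 'if i >= len(answer_key): break'
    else
      let ck := key.getD i ""
      let marked := g.countP pvFilled  -- sum(1 for circle in group if circle['is_filled'])
      if marked = 0 then
        agA_loop key (i+1) gs (res.modify "empty" 0 (· + 1)) (st ++ [((i : Int) + 1, "Empty", none, ck)])
      else if 1 < marked then
        agA_loop key (i+1) gs (res.modify "invalid" 0 (· + 1)) (st ++ [((i : Int) + 1, "Invalid", none, ck)])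
      else
        -- next(i for i, circle in enumerate(group) if circle['is_filled'])
        let mi := g.findIdx pvFilled
        -- string.ascii_lowercase[marked_index]; the IndexError for mi ≥ 26 is excluded by Pre_
        let ma := ((PySem.Str.pyGet? pvLower (mi : Int)).map Char.toString).getD ""
        if ma = ck then
          agA_loop key (i+1) gs (res.modify "correct" 0 (· + 1)) (st ++ [((i : Int) + 1, "Correct", some ma, ck)])
        else
          agA_loop key (i+1) gs (res.modify "incorrect" 0 (· + 1)) (st ++ [((i : Int) + 1, "Incorrect", some ma, ck)])

def analyze_groups (groups : List (List (List (String × Bool)))) (answer_key : List String) : (List (String × Int)) × (List (Int × String × Option String × String)) :=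
  let res0 : PySem.Dict String Int := PySem.Dict.ofList [("correct", 0), ("incorrect", 0), ("empty", 0), ("invalid", 0)]
  let p := agA_loop answer_key 0 groups res0 []
  (p.1.items, p.2)

-- ===== PORT B =====
-- the 3-state automaton value of _scan: 'empty' | ('mark', j) | 'invalid'
inductive AgState where
  | empty : AgState
  | mark : Int → AgState
  | invalid : AgState
deriving DecidableEq, Repr

-- _scan: fold the automaton over the enumerated circles
def agScan (circles : List (List (String × Bool))) : AgState :=
  (PySem.List.enumerate circles).foldl
    (fun st p => if pvFilled p.2 then (match st with | .empty => .mark p.1 | _ => .invalid) else st)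
    .empty

-- _rows: structural recursion over both lists, n is the 1-based question number
def agRows : Int → List (List (List (String × Bool))) → List String →
    List (Int × String × Option String × String)
  | _, [], _ => []
  | _, _, [] => []
  | n, g :: gs, k :: ks =>
    (match agScan g with
     | .empty => (n, "Empty", none, k)
     | .invalid => (n, "Invalid", none, k)
     | .mark j =>
       let ma := ((PySem.Str.pyGet? pvLower j).map Char.toString).getD ""
       (n, if ma = k then "Correct" else "Incorrect", some ma, k)) :: agRows (n + 1) gs ks

def analyze_groups_alt (groups : List (List (List (String × Bool)))) (answer_key : List String) : (List (String × Int)) × (List (Int × String × Option String × String)) :=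
  let st := agRows 1 groups answer_key
  let labels := st.map (fun s => s.2.1)
  let results : List (String × Int) :=
    [("correct", (labels.count "Correct" : Int)),
     ("incorrect", (labels.count "Incorrect" : Int)),
     ("empty", (labels.count "Empty" : Int)),
     ("invalid", (labels.count "Invalid" : Int))]
  (results, st)

-- ===== PRECONDITION & SPEC =====
-- Pre_ excludes exactly the inputs where Python A raises: a processed circle dict without the key
-- 'is_filled' (KeyError), or a processed group whose single filled circle sits at index ≥ 26 (IndexError).
def Pre_analyze_groups (groups : List (List (List (String × Bool)))) (answer_key : List String) : Prop :=
  ∀ g ∈ groups.take answer_key.length,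
    (∀ c ∈ g, (PySem.Dict.mk c).contains "is_filled" = true) ∧
    (g.countP pvFilled = 1 → g.findIdx pvFilled < 26)
instance (groups : List (List (List (String × Bool)))) (answer_key : List String) : Decidable (Pre_analyze_groups groups answer_key) := by unfold Pre_analyze_groups; infer_instance

def pvWitness_analyze_groups : (List (List (List (String × Bool)))) × List String :=
  ([[[("is_filled", true)], [("is_filled", false)]], [[("is_filled", false)]]], ["a", "b"])

def Spec_analyze_groups (groups : List (List (List (String × Bool)))) (answer_key : List String) (out : (List (String × Int)) × (List (Int × String × Option String × String))) : Prop := out = analyze_groups_alt groups answer_key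
instance (groups : List (List (List (String × Bool)))) (answer_key : List String) (out : (List (String × Int)) × (List (Int × String × Option String × String))) : Decidable (Spec_analyze_groups groups answer_key out) := by unfold Spec_analyze_groups; infer_instance

-- ===== CLAIM =====
def Claim_equal_analyze_groups : Prop := ∀ (groups : List (List (List (String × Bool)))) (answer_key : List String), Dom_analyze_groups groups answer_key → Pre_analyze_groups groups answer_key → Spec_analyze_groups groups answer_key (analyze_groups groups answer_key)

-- ===== LEMMAS AND PROOFS =====

-- the automaton's step function, named for the lemmas
def agStep (st : AgState) (p : Int × List (String × Bool)) : AgState :=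
  if pvFilled p.2 then (match st with | .empty => .mark p.1 | _ => .invalid) else st

lemma agScan_def (g : List (List (String × Bool))) :
    agScan g = (PySem.List.enumerate g).foldl agStep .empty := rfl

-- folding from .invalid stays .invalid
lemma agFold_invalid (l : List (Int × List (String × Bool))) :
    l.foldl agStep .invalid = .invalid := by
  induction l with
  | nil => rfl
  | cons p l ih => simp only [List.foldl_cons, agStep]; split_ifs <;> exact ih

-- folding from .mark j: stays .mark j iff no further filled circle
lemma agFold_mark (g : List (List (String × Bool))) (s j : Int) :
    (PySem.List.enumerate g s).foldl agStep (.mark j)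
      = if g.countP pvFilled = 0 then .mark j else .invalid := by
  induction g generalizing s with
  | nil => rfl
  | cons c g ih =>
    rw [PySem.List.enumerate_cons]
    simp only [List.foldl_cons, List.countP_cons]
    by_cases hc : pvFilled c
    · have hstep : agStep (.mark j) (s, c) = .invalid := by simp [agStep, hc]
      rw [hstep, agFold_invalid]
      simp [hc]
    · have hstep : agStep (.mark j) (s, c) = .mark j := by simp [agStep, hc]
      rw [hstep, ih]
      simp [hc]

-- characterization of the automaton by count and first filled index
lemma agScan_aux (g : List (List (String × Bool))) (s : Int) :
    (PySem.List.enumerate g s).foldl agStep .empty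
      = if g.countP pvFilled = 0 then .empty
        else if g.countP pvFilled = 1 then .mark (s + (g.findIdx pvFilled : Int))
        else .invalid := by
  induction g generalizing s with
  | nil => rfl
  | cons c g ih =>
    rw [PySem.List.enumerate_cons]
    simp only [List.foldl_cons, List.countP_cons, List.findIdx_cons]
    by_cases hc : pvFilled c
    · have hstep : agStep .empty (s, c) = .mark s := by simp [agStep, hc]
      rw [hstep, agFold_mark]
      by_cases h0 : g.countP pvFilled = 0
      · simp [hc, h0]
      · simp [hc, h0]
    · have hstep : agStep .empty (s, c) = .empty := by simp [agStep, hc]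
      rw [hstep, ih]
      by_cases h0 : g.countP pvFilled = 0
      · simp [hc, h0]
      · by_cases h1 : g.countP pvFilled = 1
        · simp only [hc, Bool.false_eq_true, if_false, Nat.add_zero, if_neg h0, if_pos h1, cond_false]
          congr 1
          push_cast
          ring
        · simp [hc, h0, h1]

lemma agScan_empty {g : List (List (String × Bool))} (h : g.countP pvFilled = 0) :
    agScan g = .empty := by
  rw [agScan_def, show PySem.List.enumerate g = PySem.List.enumerate g 0 from rfl, agScan_aux, if_pos h]

lemma agScan_invalid {g : List (List (String × Bool))} (h : 1 < g.countP pvFilled) :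
    agScan g = .invalid := by
  rw [agScan_def, show PySem.List.enumerate g = PySem.List.enumerate g 0 from rfl, agScan_aux,
    if_neg (by omega), if_neg (by omega)]

lemma agScan_mark {g : List (List (String × Bool))} (h : g.countP pvFilled = 1) :
    agScan g = .mark (g.findIdx pvFilled : Int) := by
  rw [agScan_def, show PySem.List.enumerate g = PySem.List.enumerate g 0 from rfl, agScan_aux,
    if_neg (by omega), if_pos h]
  norm_num

-- the dict increment A performs, keyed on the row's label
def pvBump (d : PySem.Dict String Int) (r : Int × String × Option String × String) : PySem.Dict String Int :=
  if r.2.1 = "Correct" then d.modify "correct" 0 (· + 1)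
  else if r.2.1 = "Incorrect" then d.modify "incorrect" 0 (· + 1)
  else if r.2.1 = "Empty" then d.modify "empty" 0 (· + 1)
  else d.modify "invalid" 0 (· + 1)

def pvDict4 (a b c d : Int) : PySem.Dict String Int :=
  PySem.Dict.mk [("correct", a), ("incorrect", b), ("empty", c), ("invalid", d)]

-- A's loop produces B's rows and folds pvBump over them
lemma pvA_loop (key : List String) (gs : List (List (List (String × Bool)))) :
    ∀ (i : Nat) (res : PySem.Dict String Int) (st : List (Int × String × Option String × String)),
    (∀ g ∈ gs.take (key.length - i), g.countP pvFilled = 1 → g.findIdx pvFilled < 26) →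
    agA_loop key i gs res st =
      ((agRows ((i : Int) + 1) gs (key.drop i)).foldl pvBump res,
       st ++ agRows ((i : Int) + 1) gs (key.drop i)) := by
  induction gs with
  | nil => intro i res st _; cases key.drop i <;> simp [agA_loop, agRows]
  | cons g gs ih =>
    intro i res st hpre
    by_cases hi : key.length ≤ i
    · rw [List.drop_eq_nil_of_le hi]
      simp [agA_loop, hi, agRows]
    · have hlt : i < key.length := by omega
      have hdrop : key.drop i = key[i] :: key.drop (i+1) := List.drop_eq_getElem_cons hlt
      have hget : key.getD i "" = key[i] := by simp [List.getD_eq_getElem?_getD, hlt]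
      obtain ⟨hg, hgs⟩ : ((g.countP pvFilled = 1 → g.findIdx pvFilled < 26) ∧
          ∀ g' ∈ gs.take (key.length - (i+1)), g'.countP pvFilled = 1 → g'.findIdx pvFilled < 26) := by
        constructor
        · refine hpre g ?_
          cases h : key.length - i with
          | zero => omega
          | succ n => simp
        · intro g' hg' hc
          refine hpre g' ?_ hc
          cases h : key.length - i with
          | zero => omega
          | succ n =>
            have hn : key.length - (i+1) = n := by omega
            rw [hn] at hg'
            simp
            exact .inr hg'
      rw [hdrop]
      have hcast : ((i : Int) + 1) + 1 = (((i+1 : Nat)) : Int) + 1 := by push_cast; ring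
      unfold agA_loop
      simp only [if_neg (by omega : ¬ key.length ≤ i)]
      by_cases h0 : g.countP pvFilled = 0
      · have hrow : agRows ((i : Int) + 1) (g :: gs) (key[i] :: key.drop (i+1)) =
            ((i : Int) + 1, "Empty", none, key[i]) :: agRows ((((i+1 : Nat)) : Int) + 1) gs (key.drop (i+1)) := by
          simp only [agRows, agScan_empty h0, hcast]
        simp only [h0, if_pos rfl]
        rw [ih (i+1) _ _ hgs, hget, hrow]
        simp [pvBump, List.append_assoc]
      · by_cases h1 : 1 < g.countP pvFilled
        · have hrow : agRows ((i : Int) + 1) (g :: gs) (key[i] :: key.drop (i+1)) =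
              ((i : Int) + 1, "Invalid", none, key[i]) :: agRows ((((i+1 : Nat)) : Int) + 1) gs (key.drop (i+1)) := by
            simp only [agRows, agScan_invalid h1, hcast]
          simp only [if_neg h0, if_pos h1]
          rw [ih (i+1) _ _ hgs, hget, hrow]
          simp [pvBump, List.append_assoc]
        · have hc1 : g.countP pvFilled = 1 := by omega
          set ma := ((PySem.Str.pyGet? pvLower ((g.findIdx pvFilled : Int))).map Char.toString).getD "" with hma
          have hrow : agRows ((i : Int) + 1) (g :: gs) (key[i] :: key.drop (i+1)) =
              ((i : Int) + 1, if ma = key[i] then "Correct" else "Incorrect", some ma, key[i])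
                :: agRows ((((i+1 : Nat)) : Int) + 1) gs (key.drop (i+1)) := by
            simp only [agRows, agScan_mark hc1, hcast, hma]
          simp only [if_neg h0, if_neg h1]
          by_cases heq : ma = key[i]
          · rw [if_pos (by rw [hget]; exact heq)]
            rw [ih (i+1) _ _ hgs, hget, hrow]
            simp only [if_pos heq]
            simp [pvBump, List.append_assoc]
          · rw [if_neg (by rw [hget]; exact heq)]
            rw [ih (i+1) _ _ hgs, hget, hrow]
            simp only [if_neg heq]
            simp [pvBump, heq, List.append_assoc]

lemma pvBump_correct (a b c d : Int) : (pvDict4 a b c d).modify "correct" 0 (· + 1) = pvDict4 (a+1) b c d := rfl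
lemma pvBump_incorrect (a b c d : Int) : (pvDict4 a b c d).modify "incorrect" 0 (· + 1) = pvDict4 a (b+1) c d := rfl
lemma pvBump_empty (a b c d : Int) : (pvDict4 a b c d).modify "empty" 0 (· + 1) = pvDict4 a b (c+1) d := rfl
lemma pvBump_invalid (a b c d : Int) : (pvDict4 a b c d).modify "invalid" 0 (· + 1) = pvDict4 a b c (d+1) := rfl

-- every row's label is one of the four strings
lemma agRows_labels (gs : List (List (List (String × Bool)))) (ks : List String) (n : Int) :
    ∀ r ∈ agRows n gs ks, r.2.1 = "Correct" ∨ r.2.1 = "Incorrect" ∨ r.2.1 = "Empty" ∨ r.2.1 = "Invalid" := by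
  induction gs generalizing ks n with
  | nil => cases ks <;> simp [agRows]
  | cons g gs ih =>
    cases ks with
    | nil => simp [agRows]
    | cons k ks =>
      intro r hr
      simp only [agRows, List.mem_cons] at hr
      rcases hr with hr | hr
      · rw [hr]
        cases agScan g <;> simp <;> tauto
      · exact ih ks (n+1) r hr

-- folding pvBump over the rows from the literal start dict yields the four label counts
lemma pvFold_bump (rs : List (Int × String × Option String × String))
    (hlab : ∀ r ∈ rs, r.2.1 = "Correct" ∨ r.2.1 = "Incorrect" ∨ r.2.1 = "Empty" ∨ r.2.1 = "Invalid") :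
    ∀ (a b c d : Int),
    (rs.foldl pvBump (pvDict4 a b c d)).items
      = [("correct", a + ((rs.map (fun s => s.2.1)).count "Correct" : Int)),
         ("incorrect", b + ((rs.map (fun s => s.2.1)).count "Incorrect" : Int)),
         ("empty", c + ((rs.map (fun s => s.2.1)).count "Empty" : Int)),
         ("invalid", d + ((rs.map (fun s => s.2.1)).count "Invalid" : Int))] := by
  induction rs with
  | nil => intro a b c d; simp [pvDict4, PySem.Dict.items]
  | cons r rs ih =>
    have hr := hlab r (by simp)
    have ih := ih (fun r' hr' => hlab r' (by simp [hr']))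
    intro a b c d
    simp only [List.foldl_cons, List.map_cons, List.count_cons]
    by_cases h1 : r.2.1 = "Correct"
    · rw [show pvBump (pvDict4 a b c d) r = pvDict4 (a+1) b c d by
        simp [pvBump, h1, pvBump_correct], ih]
      simp [h1]
      push_cast; omega
    · by_cases h2 : r.2.1 = "Incorrect"
      · rw [show pvBump (pvDict4 a b c d) r = pvDict4 a (b+1) c d by
          simp [pvBump, h1, h2, pvBump_incorrect], ih]
        simp [h1, h2]
        push_cast; omega
      · by_cases h3 : r.2.1 = "Empty"
        · rw [show pvBump (pvDict4 a b c d) r = pvDict4 a b (c+1) d by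
            simp [pvBump, h1, h2, h3, pvBump_empty], ih]
          simp [h1, h2, h3]
          push_cast; omega
        · have h4 : r.2.1 = "Invalid" := by rcases hr with h|h|h|h <;> first | exact h | exact absurd h (by assumption)
          rw [show pvBump (pvDict4 a b c d) r = pvDict4 a b c (d+1) by
            simp [pvBump, h1, h2, h3, pvBump_invalid], ih]
          simp [h1, h2, h3, h4]
          omega

-- ===== VERDICT (by name: the statement is the Claim_ definition above) =====
theorem analyze_groups_spec : Claim_equal_analyze_groups := by
  intro groups key _ hpre
  unfold Spec_analyze_groups analyze_groups analyze_groups_alt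
  have hA := pvA_loop key groups 0 (pvDict4 0 0 0 0) []
    (by intro g hg hc; exact (hpre g (by simpa using hg)).2 hc)
  have h0 : (PySem.Dict.ofList [("correct", (0:Int)), ("incorrect", 0), ("empty", 0), ("invalid", 0)] : PySem.Dict String Int) = pvDict4 0 0 0 0 := rfl
  simp only [h0]
  rw [show agA_loop key 0 groups (pvDict4 0 0 0 0) [] =
      ((agRows ((0 : Int) + 1) groups (key.drop 0)).foldl pvBump (pvDict4 0 0 0 0),
       [] ++ agRows ((0 : Int) + 1) groups (key.drop 0)) from hA]
  simp only [List.drop_zero, List.nil_append, zero_add]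
  rw [pvFold_bump _ (agRows_labels groups key 1)]
  simp
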